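-- pv_equiv track=rewrite | github.com/pisterlabs/promptset | data/scraping-2.0/repos/ckak912~CodeBuddy_LLM/front_end~server~content.py | get_next_prev_exercises
-- ===== SOURCE A (Python) =====
-- def get_next_prev_exercises(course_id, assignment_id, exercise, exercises):
--     prev_exercise = None
--     next_exercise = None
--
--     if len(exercises) > 0 and exercise:
--         this_exercise = [i for i in range(len(exercises)) if exercises[i][0] == int(exercise)]
--         if len(this_exercise) > 0:
--             this_exercise_index = [i for i in range(len(exercises)) if exercises[i][0] == int(exercise)][0]
--
--             if len(exercises) >= 2 and this_exercise_index != 0: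
--                 prev_exercise = exercises[this_exercise_index - 1][1]
--
--             if len(exercises) >= 2 and this_exercise_index != (len(exercises) - 1):
--                 next_exercise = exercises[this_exercise_index + 1][1]
--
--     return {"previous": prev_exercise, "next": next_exercise}
-- ===== SOURCE B (Python) =====
-- def get_next_prev_exercises(course_id, assignment_id, exercise, exercises):
--     prev_exercise = None
--     next_exercise = None
--
--     if len(exercises) > 0 and exercise:
--         target = int(exercise)
--         prev_item = None
--         found = False
--         for item in exercises:
--             if found:
--                 next_exercise = item[1]
--                 break
--             if item[0] == target:
--                 if prev_item is not None:
--                     prev_exercise = prev_item[1]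
--                 found = True
--             else:
--                 prev_item = item
--
--     return {"previous": prev_exercise, "next": next_exercise}
-- ===== Notes on version B (the rewrite author's own statement) =====
-- stated objective: faster
-- what changed: Replaced the two index-list comprehensions (each re-parsing int(exercise) per element) and index arithmetic by a single early-exit scan maintaining prev_item and a found flag, parsing the id once.
import Mathlib
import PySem

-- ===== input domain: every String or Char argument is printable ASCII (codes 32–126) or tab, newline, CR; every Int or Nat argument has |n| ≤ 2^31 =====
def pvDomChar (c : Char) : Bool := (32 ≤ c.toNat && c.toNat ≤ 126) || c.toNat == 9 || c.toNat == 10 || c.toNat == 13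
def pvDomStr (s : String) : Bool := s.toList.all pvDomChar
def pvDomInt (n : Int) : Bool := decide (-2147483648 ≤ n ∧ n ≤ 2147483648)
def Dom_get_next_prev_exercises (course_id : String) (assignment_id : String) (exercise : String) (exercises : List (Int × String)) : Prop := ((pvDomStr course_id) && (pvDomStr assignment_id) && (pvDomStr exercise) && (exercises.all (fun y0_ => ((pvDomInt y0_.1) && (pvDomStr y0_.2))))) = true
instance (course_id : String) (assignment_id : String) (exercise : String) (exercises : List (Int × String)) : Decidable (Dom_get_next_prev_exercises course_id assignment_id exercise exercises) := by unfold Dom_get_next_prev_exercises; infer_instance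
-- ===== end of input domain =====

-- B replaces A's two index-list comprehensions by one early-exit scan with a prev_item/found state (constant-factor speedup; one int() parse instead of n).

-- ===== PORT A =====
def get_next_prev_exercises (course_id : String) (assignment_id : String) (exercise : String) (exercises : List (Int × String)) : List (String × Option String) :=
  let prev0 : Option String := none
  let next0 : Option String := none
  let pn :=
    if exercises.length > 0 ∧ exercise ≠ "" then
      match PySem.Int.ofStr? exercise with
      | none => (prev0, next0)  -- int(exercise) raises ValueError in Python; excluded by Pre_
      | some t =>
        let this_exercise := (PySem.List.pyRange 0 (exercises.length : Int) 1).filter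
            (fun i => (PySem.List.pyGet? exercises i).map Prod.fst == some t)
        if this_exercise.length > 0 then
          let this_exercise_index := ((PySem.List.pyRange 0 (exercises.length : Int) 1).filter
            (fun i => (PySem.List.pyGet? exercises i).map Prod.fst == some t)).headI
          let p := if exercises.length ≥ 2 ∧ this_exercise_index ≠ 0 then
                     (PySem.List.pyGet? exercises (this_exercise_index - 1)).map Prod.snd
                   else prev0
          let n := if exercises.length ≥ 2 ∧ this_exercise_index ≠ ((exercises.length : Int) - 1) then
                     (PySem.List.pyGet? exercises (this_exercise_index + 1)).map Prod.snd
                   else next0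
          (p, n)
        else (prev0, next0)
    else (prev0, next0)
  [("previous", pn.1), ("next", pn.2)]

-- ===== PORT B =====
-- B's loop: prev_item accumulator until the first match; on the match, prev from prev_item,
-- next from the following item (the iteration after 'found' that breaks) = rest.head?.
def pvScan (t : Int) : Option (Int × String) → List (Int × String) → Option String × Option String
  | _, [] => (none, none)
  | prev_item, item :: rest =>
      if item.1 == t then
        (prev_item.map Prod.snd, rest.head?.map Prod.snd)
      else pvScan t (some item) rest

def get_next_prev_exercises_alt (course_id : String) (assignment_id : String) (exercise : String) (exercises : List (Int × String)) : List (String × Option String) :=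
  let pn :=
    if exercises.length > 0 ∧ exercise ≠ "" then
      match PySem.Int.ofStr? exercise with
      | none => ((none : Option String), (none : Option String))  -- int(exercise) raises; excluded by Pre_
      | some t => pvScan t none exercises
    else (none, none)
  [("previous", pn.1), ("next", pn.2)]

-- ===== PRECONDITION & SPEC =====
-- Pre_ excludes exactly the inputs where Python A raises ValueError: a nonempty list with a
-- non-empty, non-integer 'exercise' string (B raises there too).
def Pre_get_next_prev_exercises (course_id : String) (assignment_id : String) (exercise : String) (exercises : List (Int × String)) : Prop :=
  exercises = [] ∨ exercise = "" ∨ (PySem.Int.ofStr? exercise).isSome = true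
instance (course_id : String) (assignment_id : String) (exercise : String) (exercises : List (Int × String)) : Decidable (Pre_get_next_prev_exercises course_id assignment_id exercise exercises) := by unfold Pre_get_next_prev_exercises; infer_instance

def pvWitness_get_next_prev_exercises : String × String × String × (List (Int × String)) :=
  ("c1", "a1", "2", [(1, "ex1"), (2, "ex2"), (3, "ex3")])

def Spec_get_next_prev_exercises (course_id : String) (assignment_id : String) (exercise : String) (exercises : List (Int × String)) (out : List (String × Option String)) : Prop := out = get_next_prev_exercises_alt course_id assignment_id exercise exercises
instance (course_id : String) (assignment_id : String) (exercise : String) (exercises : List (Int × String)) (out : List (String × Option String)) : Decidable (Spec_get_next_prev_exercises course_id assignment_id exercise exercises out) := by unfold Spec_get_next_prev_exercises; infer_instance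

-- ===== CLAIM (what is proved, stated in full; the proofs are below) =====
def Claim_equal_get_next_prev_exercises : Prop := ∀ (course_id : String) (assignment_id : String) (exercise : String) (exercises : List (Int × String)), Dom_get_next_prev_exercises course_id assignment_id exercise exercises → Pre_get_next_prev_exercises course_id assignment_id exercise exercises → Spec_get_next_prev_exercises course_id assignment_id exercise exercises (get_next_prev_exercises course_id assignment_id exercise exercises)

-- ===== LEMMAS AND PROOFS =====

-- B's scan, characterised by the first matching index.
lemma pvScan_eq_findIdx? (t : Int) (prev : Option (Int × String)) (l : List (Int × String)) :
    pvScan t prev l =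
      match l.findIdx? (fun x => x.1 == t) with
      | none => (none, none)
      | some j => ((if j = 0 then prev.map Prod.snd else (l[j-1]?).map Prod.snd),
                   (l[j+1]?).map Prod.snd) := by
  induction l generalizing prev with
  | nil => simp [pvScan]
  | cons x rest ih =>
    by_cases hx : x.1 == t
    · simp [pvScan, hx, List.findIdx?_cons, List.head?_eq_getElem?]
    · simp only [pvScan, hx, ih, List.findIdx?_cons]
      cases h : rest.findIdx? (fun x => x.1 == t) with
      | none => simp
      | some j => cases j with
        | zero => simp
        | succ k => simp

lemma head?_filter_range_eq_findIdx? (t : Int) (l : List (Int × String)) :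
    ((List.range l.length).filter (fun k => l[k]?.map Prod.fst == some t)).head?
      = l.findIdx? (fun x => x.1 == t) := by
  induction l with
  | nil => simp
  | cons x rest ih =>
    rw [List.length_cons, List.range_succ_eq_map, List.filter_cons]
    by_cases hx : x.1 == t
    · simp [hx, List.findIdx?_cons]
    · simp [hx, List.findIdx?_cons, List.filter_map, Function.comp_def, ← ih]

lemma pvA_core_eq_pvScan (t : Int) (l : List (Int × String)) (hl : l.length > 0) :
    (let this_exercise := (PySem.List.pyRange 0 (l.length : Int) 1).filter
            (fun i => (PySem.List.pyGet? l i).map Prod.fst == some t)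
     if this_exercise.length > 0 then
          let this_exercise_index := ((PySem.List.pyRange 0 (l.length : Int) 1).filter
            (fun i => (PySem.List.pyGet? l i).map Prod.fst == some t)).headI
          let p := if l.length ≥ 2 ∧ this_exercise_index ≠ 0 then
                     (PySem.List.pyGet? l (this_exercise_index - 1)).map Prod.snd
                   else none
          let n := if l.length ≥ 2 ∧ this_exercise_index ≠ ((l.length : Int) - 1) then
                     (PySem.List.pyGet? l (this_exercise_index + 1)).map Prod.snd
                   else none
          (p, n)
     else ((none : Option String), (none : Option String)))
    = pvScan t none l := by
  have hA : (PySem.List.pyRange 0 (l.length : Int) 1).filter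
      (fun i => (PySem.List.pyGet? l i).map Prod.fst == some t)
      = ((List.range l.length).filter (fun k => l[k]?.map Prod.fst == some t)).map (fun (k : Nat) => (k : Int)) := by
    rw [PySem.List.pyRange_one, List.filter_map]
    congr 1
    · funext k
      simp
    · apply List.filter_congr
      intro k _
      simp
  rw [pvScan_eq_findIdx?, hA, ← head?_filter_range_eq_findIdx?]
  cases hf : ((List.range l.length).filter (fun k => l[k]?.map Prod.fst == some t)).head? with
  | none =>
    rw [List.head?_eq_none_iff] at hf
    simp [hf]
  | some j =>
    have hj : j < l.length := List.mem_range.mp (List.mem_of_mem_filter (List.mem_of_mem_head? hf))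
    obtain ⟨tl, htl⟩ : ∃ tl, ((List.range l.length).filter (fun k => l[k]?.map Prod.fst == some t)) = j :: tl := by
      cases h : ((List.range l.length).filter (fun k => l[k]?.map Prod.fst == some t)) with
      | nil => rw [h] at hf; simp at hf
      | cons a b => rw [h] at hf; simp at hf; exact ⟨b, by rw [hf]⟩
    rw [htl, List.map_cons]
    rw [if_pos (by simp)]
    rw [List.headI_cons, Prod.mk.injEq]
    refine ⟨?_, ?_⟩
    · -- prev component
      cases j with
      | zero => simp
      | succ k =>
        have h2 : l.length ≥ 2 := by omega
        have : ((k+1 : Nat) : Int) - 1 = (k : Int) := by push_cast; ring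
        rw [if_pos ⟨h2, by push_cast; omega⟩, this, PySem.List.pyGet?_natCast]
        simp
    · -- next component
      by_cases hlast : j = l.length - 1
      · have : l[j+1]? = none := by rw [List.getElem?_eq_none_iff]; omega
        rw [this, if_neg]
        · simp
        · rintro ⟨h2, hne⟩; apply hne; subst hlast; push_cast [Nat.cast_sub (by omega : 1 ≤ l.length)]; omega
      · have h2 : l.length ≥ 2 := by omega
        rw [if_pos ⟨h2, by push_cast [Nat.cast_sub (by omega : 1 ≤ l.length)]; omega⟩]
        have : ((j : Int) + 1) = ((j+1 : Nat) : Int) := by push_cast; ring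
        rw [this, PySem.List.pyGet?_natCast]

-- ===== VERDICT (by name: the statement is the Claim_ definition above) =====
theorem get_next_prev_exercises_spec : Claim_equal_get_next_prev_exercises := by
  intro course_id assignment_id exercise exercises _ hpre
  unfold Spec_get_next_prev_exercises
  by_cases hg : exercises.length > 0 ∧ exercise ≠ ""
  · cases ht : PySem.Int.ofStr? exercise with
    | none =>
      exfalso
      rcases hpre with h | h | h
      · simp [h] at hg
      · exact hg.2 h
      · rw [ht] at h; simp at h
    | some t =>
      have hcore := pvA_core_eq_pvScan t exercises hg.1
      simp only [get_next_prev_exercises, get_next_prev_exercises_alt, if_pos hg, ht] at *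
      rw [hcore]
  · simp [get_next_prev_exercises, get_next_prev_exercises_alt, hg]
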